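-- pv_equiv track=rewrite | github.com/s2e-lab/Code-Smell-Code-Generation | Validation/PylintSamples/R0915_1762.py | convert_moves_to_points
-- ===== SOURCE A (Python) =====
-- def convert_moves_to_points(moves):
--   points = [(0, 0)]
--   x = 0
--   y = 0
--   dir = 0
--   for i in range(len(moves)):
--     if (dir == 0):
--       if (moves[i][0] == 'L'):
--         x = x - moves[i][1]
--       else:
--         x = x + moves[i][1]
--     elif (dir == 1):
--       if (moves[i][0] == 'L'):
--         y = y + moves[i][1]
--       else:
--         y = y - moves[i][1]
--     elif (dir == 2):
--       if (moves[i][0] == 'L'):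
--         x = x + moves[i][1]
--       else:
--         x = x - moves[i][1]
--     elif (dir == 3):
--       if (moves[i][0] == 'L'):
--         y = y - moves[i][1]
--       else:
--         y = y + moves[i][1]
--     if (moves[i][0] == 'L'):
--       if (dir == 0):
--         dir = 3
--       else:
--         dir = (dir - 1) % 4
--     else:
--       dir = (dir + 1) % 4
--     points.append((x, y))
--   return points
-- ===== SOURCE B (Python) =====
-- def convert_moves_to_points(moves):
--     # Table-driven two-pass version: pass 1 turns each move into a coordinate
--     # delta using a turn counter and a heading table; pass 2 prefix-sums them.
--     H = [(1, 0), (0, -1), (-1, 0), (0, 1)]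
--     deltas = []
--     t = 0
--     for c, a in moves:
--         if c == 'L':
--             hx, hy = H[(t + 2) % 4]
--             t -= 1
--         else:
--             hx, hy = H[t % 4]
--             t += 1
--         deltas.append((hx * a, hy * a))
--     points = [(0, 0)]
--     x = 0
--     y = 0
--     for dx, dy in deltas:
--         x += dx
--         y += dy
--         points.append((x, y))
--     return points
-- ===== Notes on version B (the rewrite author's own statement) =====
-- stated objective: alternative
-- what changed: Replaces the 4-state direction machine with its 8-way branch cascade by a signed turn counter and a heading lookup table that produce a per-move delta list in one pass, followed by a separate prefix-sum pass over the deltas.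
import Mathlib
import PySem

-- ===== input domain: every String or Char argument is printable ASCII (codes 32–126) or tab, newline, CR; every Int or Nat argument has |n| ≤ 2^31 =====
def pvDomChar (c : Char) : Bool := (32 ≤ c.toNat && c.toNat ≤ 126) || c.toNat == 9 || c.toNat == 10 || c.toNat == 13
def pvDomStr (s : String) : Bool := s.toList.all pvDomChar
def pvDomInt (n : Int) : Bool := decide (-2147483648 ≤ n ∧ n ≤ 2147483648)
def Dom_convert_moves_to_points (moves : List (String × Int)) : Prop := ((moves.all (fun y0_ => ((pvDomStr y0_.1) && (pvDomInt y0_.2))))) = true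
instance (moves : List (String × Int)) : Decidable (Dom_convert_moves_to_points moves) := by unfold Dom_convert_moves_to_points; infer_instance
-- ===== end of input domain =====

-- B replaces A's 4-state direction machine by a turn counter + heading table producing a delta list, then prefix-sums it; alternative structure, same O(n) cost.


-- ===== PORT A =====
-- one iteration of A's loop body: state = (points, x, y, dir)
def cmtpStepA (st : List (Int × Int) × Int × Int × Int) (m : String × Int) :
    List (Int × Int) × Int × Int × Int :=
  match st with
  | (points, x, y, dir) =>
    let xy : Int × Int :=
      if dir == 0 then
        (if m.1 == "L" then (x - m.2, y) else (x + m.2, y))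
      else if dir == 1 then
        (if m.1 == "L" then (x, y + m.2) else (x, y - m.2))
      else if dir == 2 then
        (if m.1 == "L" then (x + m.2, y) else (x - m.2, y))
      else if dir == 3 then
        (if m.1 == "L" then (x, y - m.2) else (x, y + m.2))
      else (x, y)
    let dir' : Int :=
      if m.1 == "L" then
        (if dir == 0 then 3 else PySem.Int.mod (dir - 1) 4)
      else PySem.Int.mod (dir + 1) 4
    (points ++ [xy], xy.1, xy.2, dir')

def convert_moves_to_points (moves : List (String × Int)) : List (Int × Int) :=
  (moves.foldl cmtpStepA ([(0, 0)], 0, 0, 0)).1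

-- ===== PORT B =====
-- heading table H[k] for k = 0..3
def cmtpH (k : Int) : Int × Int :=
  if k == 0 then (1, 0) else if k == 1 then (0, -1) else if k == 2 then (-1, 0) else (0, 1)

-- pass 1: turn counter t, one delta per move
def cmtpDeltas : List (String × Int) → Int → List (Int × Int)
  | [], _ => []
  | (c, a) :: rest, t =>
    if c == "L" then
      let h := cmtpH (PySem.Int.mod (t + 2) 4)
      (h.1 * a, h.2 * a) :: cmtpDeltas rest (t - 1)
    else
      let h := cmtpH (PySem.Int.mod t 4)
      (h.1 * a, h.2 * a) :: cmtpDeltas rest (t + 1)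

-- pass 2: prefix sums; state = (points, x, y)
def cmtpStepAcc (st : List (Int × Int) × Int × Int) (d : Int × Int) :
    List (Int × Int) × Int × Int :=
  match st, d with
  | (points, x, y), (dx, dy) => (points ++ [(x + dx, y + dy)], x + dx, y + dy)

def convert_moves_to_points_alt (moves : List (String × Int)) : List (Int × Int) :=
  ((cmtpDeltas moves 0).foldl cmtpStepAcc ([(0, 0)], 0, 0)).1

-- ===== PRECONDITION & SPEC =====
def Spec_convert_moves_to_points (moves : List (String × Int)) (out : List (Int × Int)) : Prop := out = convert_moves_to_points_alt moves
instance (moves : List (String × Int)) (out : List (Int × Int)) : Decidable (Spec_convert_moves_to_points moves out) := by unfold Spec_convert_moves_to_points; infer_instance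

-- ===== CLAIM (what is proved, stated in full; the proofs are below) =====
def Claim_equal_convert_moves_to_points : Prop := ∀ (moves : List (String × Int)), Dom_convert_moves_to_points moves → Spec_convert_moves_to_points moves (convert_moves_to_points moves)

-- ===== LEMMAS AND PROOFS =====

theorem cmtp_key (ms : List (String × Int)) :
    ∀ (pts : List (Int × Int)) (x y t : Int),
      (ms.foldl cmtpStepA (pts, x, y, PySem.Int.mod t 4)).1
        = ((cmtpDeltas ms t).foldl cmtpStepAcc (pts, x, y)).1 := by
  induction ms with
  | nil => intro pts x y t; rfl
  | cons m rest ih =>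
    intro pts x y t
    obtain ⟨c, a⟩ := m
    have hd : PySem.Int.mod t 4 = t % 4 :=
      PySem.Int.mod_eq_emod_of_pos (by norm_num)
    have hr4 : t % 4 = 0 ∨ t % 4 = 1 ∨ t % 4 = 2 ∨ t % 4 = 3 := by omega
    by_cases hc : c == "L"
    · rcases hr4 with hr | hr | hr | hr
      · -- t % 4 = 0
        have hp2 : PySem.Int.mod (t + 2) 4 = 2 := by
          rw [PySem.Int.mod_eq_emod_of_pos (by norm_num)]; omega
        have hm : PySem.Int.mod (t - 1) 4 = 3 := by
          rw [PySem.Int.mod_eq_emod_of_pos (by norm_num)]; omega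
        have hdel : cmtpDeltas ((c, a) :: rest) t = (-a, 0) :: cmtpDeltas rest (t - 1) := by
          simp only [cmtpDeltas, hc, if_true]
          rw [hp2]
          norm_num [cmtpH]
        have hA : cmtpStepA (pts, x, y, (0 : Int)) (c, a) = (pts ++ [(x - a, y)], x - a, y, 3) := by
          simp [cmtpStepA, hc]
        have hAcc : cmtpStepAcc (pts, x, y) (-a, 0) = (pts ++ [(x - a, y)], x - a, y) := by
          simp [cmtpStepAcc, sub_eq_add_neg]
        rw [hd, hr, List.foldl_cons, hdel, List.foldl_cons, hA, hAcc]
        have h := ih (pts ++ [(x - a, y)]) (x - a) (y) (t - 1)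
        rw [hm] at h
        exact h
      · -- t % 4 = 1
        have hp2 : PySem.Int.mod (t + 2) 4 = 3 := by
          rw [PySem.Int.mod_eq_emod_of_pos (by norm_num)]; omega
        have hm : PySem.Int.mod (t - 1) 4 = 0 := by
          rw [PySem.Int.mod_eq_emod_of_pos (by norm_num)]; omega
        have hdel : cmtpDeltas ((c, a) :: rest) t = (0, a) :: cmtpDeltas rest (t - 1) := by
          simp only [cmtpDeltas, hc, if_true]
          rw [hp2]
          norm_num [cmtpH]
        have hA : cmtpStepA (pts, x, y, (1 : Int)) (c, a) = (pts ++ [(x, y + a)], x, y + a, 0) := by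
          simp [cmtpStepA, hc]
        have hAcc : cmtpStepAcc (pts, x, y) (0, a) = (pts ++ [(x, y + a)], x, y + a) := by
          simp [cmtpStepAcc, sub_eq_add_neg]
        rw [hd, hr, List.foldl_cons, hdel, List.foldl_cons, hA, hAcc]
        have h := ih (pts ++ [(x, y + a)]) (x) (y + a) (t - 1)
        rw [hm] at h
        exact h
      · -- t % 4 = 2
        have hp2 : PySem.Int.mod (t + 2) 4 = 0 := by
          rw [PySem.Int.mod_eq_emod_of_pos (by norm_num)]; omega
        have hm : PySem.Int.mod (t - 1) 4 = 1 := by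
          rw [PySem.Int.mod_eq_emod_of_pos (by norm_num)]; omega
        have hdel : cmtpDeltas ((c, a) :: rest) t = (a, 0) :: cmtpDeltas rest (t - 1) := by
          simp only [cmtpDeltas, hc, if_true]
          rw [hp2]
          norm_num [cmtpH]
        have hA : cmtpStepA (pts, x, y, (2 : Int)) (c, a) = (pts ++ [(x + a, y)], x + a, y, 1) := by
          simp [cmtpStepA, hc]
        have hAcc : cmtpStepAcc (pts, x, y) (a, 0) = (pts ++ [(x + a, y)], x + a, y) := by
          simp [cmtpStepAcc, sub_eq_add_neg]
        rw [hd, hr, List.foldl_cons, hdel, List.foldl_cons, hA, hAcc]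
        have h := ih (pts ++ [(x + a, y)]) (x + a) (y) (t - 1)
        rw [hm] at h
        exact h
      · -- t % 4 = 3
        have hp2 : PySem.Int.mod (t + 2) 4 = 1 := by
          rw [PySem.Int.mod_eq_emod_of_pos (by norm_num)]; omega
        have hm : PySem.Int.mod (t - 1) 4 = 2 := by
          rw [PySem.Int.mod_eq_emod_of_pos (by norm_num)]; omega
        have hdel : cmtpDeltas ((c, a) :: rest) t = (0, -a) :: cmtpDeltas rest (t - 1) := by
          simp only [cmtpDeltas, hc, if_true]
          rw [hp2]
          norm_num [cmtpH]
        have hA : cmtpStepA (pts, x, y, (3 : Int)) (c, a) = (pts ++ [(x, y - a)], x, y - a, 2) := by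
          simp [cmtpStepA, hc]
        have hAcc : cmtpStepAcc (pts, x, y) (0, -a) = (pts ++ [(x, y - a)], x, y - a) := by
          simp [cmtpStepAcc, sub_eq_add_neg]
        rw [hd, hr, List.foldl_cons, hdel, List.foldl_cons, hA, hAcc]
        have h := ih (pts ++ [(x, y - a)]) (x) (y - a) (t - 1)
        rw [hm] at h
        exact h
    · rcases hr4 with hr | hr | hr | hr
      · -- t % 4 = 0
        have hm : PySem.Int.mod (t + 1) 4 = 1 := by
          rw [PySem.Int.mod_eq_emod_of_pos (by norm_num)]; omega
        have hdel : cmtpDeltas ((c, a) :: rest) t = (a, 0) :: cmtpDeltas rest (t + 1) := by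
          simp only [cmtpDeltas, hc, Bool.false_eq_true, if_false]
          rw [hd, hr]
          norm_num [cmtpH]
        have hA : cmtpStepA (pts, x, y, (0 : Int)) (c, a) = (pts ++ [(x + a, y)], x + a, y, 1) := by
          simp [cmtpStepA, hc]
        have hAcc : cmtpStepAcc (pts, x, y) (a, 0) = (pts ++ [(x + a, y)], x + a, y) := by
          simp [cmtpStepAcc, sub_eq_add_neg]
        rw [hd, hr, List.foldl_cons, hdel, List.foldl_cons, hA, hAcc]
        have h := ih (pts ++ [(x + a, y)]) (x + a) (y) (t + 1)
        rw [hm] at h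
        exact h
      · -- t % 4 = 1
        have hm : PySem.Int.mod (t + 1) 4 = 2 := by
          rw [PySem.Int.mod_eq_emod_of_pos (by norm_num)]; omega
        have hdel : cmtpDeltas ((c, a) :: rest) t = (0, -a) :: cmtpDeltas rest (t + 1) := by
          simp only [cmtpDeltas, hc, Bool.false_eq_true, if_false]
          rw [hd, hr]
          norm_num [cmtpH]
        have hA : cmtpStepA (pts, x, y, (1 : Int)) (c, a) = (pts ++ [(x, y - a)], x, y - a, 2) := by
          simp [cmtpStepA, hc]
        have hAcc : cmtpStepAcc (pts, x, y) (0, -a) = (pts ++ [(x, y - a)], x, y - a) := by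
          simp [cmtpStepAcc, sub_eq_add_neg]
        rw [hd, hr, List.foldl_cons, hdel, List.foldl_cons, hA, hAcc]
        have h := ih (pts ++ [(x, y - a)]) (x) (y - a) (t + 1)
        rw [hm] at h
        exact h
      · -- t % 4 = 2
        have hm : PySem.Int.mod (t + 1) 4 = 3 := by
          rw [PySem.Int.mod_eq_emod_of_pos (by norm_num)]; omega
        have hdel : cmtpDeltas ((c, a) :: rest) t = (-a, 0) :: cmtpDeltas rest (t + 1) := by
          simp only [cmtpDeltas, hc, Bool.false_eq_true, if_false]
          rw [hd, hr]
          norm_num [cmtpH]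
        have hA : cmtpStepA (pts, x, y, (2 : Int)) (c, a) = (pts ++ [(x - a, y)], x - a, y, 3) := by
          simp [cmtpStepA, hc]
        have hAcc : cmtpStepAcc (pts, x, y) (-a, 0) = (pts ++ [(x - a, y)], x - a, y) := by
          simp [cmtpStepAcc, sub_eq_add_neg]
        rw [hd, hr, List.foldl_cons, hdel, List.foldl_cons, hA, hAcc]
        have h := ih (pts ++ [(x - a, y)]) (x - a) (y) (t + 1)
        rw [hm] at h
        exact h
      · -- t % 4 = 3
        have hm : PySem.Int.mod (t + 1) 4 = 0 := by
          rw [PySem.Int.mod_eq_emod_of_pos (by norm_num)]; omega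
        have hdel : cmtpDeltas ((c, a) :: rest) t = (0, a) :: cmtpDeltas rest (t + 1) := by
          simp only [cmtpDeltas, hc, Bool.false_eq_true, if_false]
          rw [hd, hr]
          norm_num [cmtpH]
        have hA : cmtpStepA (pts, x, y, (3 : Int)) (c, a) = (pts ++ [(x, y + a)], x, y + a, 0) := by
          simp [cmtpStepA, hc]
        have hAcc : cmtpStepAcc (pts, x, y) (0, a) = (pts ++ [(x, y + a)], x, y + a) := by
          simp [cmtpStepAcc, sub_eq_add_neg]
        rw [hd, hr, List.foldl_cons, hdel, List.foldl_cons, hA, hAcc]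
        have h := ih (pts ++ [(x, y + a)]) (x) (y + a) (t + 1)
        rw [hm] at h
        exact h

-- ===== VERDICT (by name: the statement is the Claim_ definition above) =====
theorem convert_moves_to_points_spec : Claim_equal_convert_moves_to_points := by
  intro moves _
  unfold Spec_convert_moves_to_points convert_moves_to_points convert_moves_to_points_alt
  have h := cmtp_key moves [(0, 0)] 0 0 0
  simpa using h
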